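-- pv_equiv track=rewrite | github.com/jfontsaballs/ProjectEuler | eulerMath.py | _combineFactors
-- ===== SOURCE A (Python) =====
-- def _combineFactors(a, b):
--     if a and b:
--         temp = list(b)
--         for x in a:
--             try:
--                 temp.remove(x)
--             except ValueError:
--                 pass
--         return list(a) + temp
--     else:
--         return list(a or b)
-- ===== SOURCE B (Python) =====
-- def _combineFactors(a, b):
--     counts = {}
--     for x in a:
--         counts[x] = counts.get(x, 0) + 1
--     rest = []
--     for y in b:
--         c = counts.get(y, 0)
--         if c:
--             counts[y] = c - 1
--         else:
--             rest.append(y)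
--     return list(a) + rest
-- ===== Notes on version B (the rewrite author's own statement) =====
-- stated objective: faster
-- what changed: Replaces the per-element list.remove scan of b with a counter of a's elements built once and a single pass over b that decrements counts, eliminating the inner linear scan.
import Mathlib
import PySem

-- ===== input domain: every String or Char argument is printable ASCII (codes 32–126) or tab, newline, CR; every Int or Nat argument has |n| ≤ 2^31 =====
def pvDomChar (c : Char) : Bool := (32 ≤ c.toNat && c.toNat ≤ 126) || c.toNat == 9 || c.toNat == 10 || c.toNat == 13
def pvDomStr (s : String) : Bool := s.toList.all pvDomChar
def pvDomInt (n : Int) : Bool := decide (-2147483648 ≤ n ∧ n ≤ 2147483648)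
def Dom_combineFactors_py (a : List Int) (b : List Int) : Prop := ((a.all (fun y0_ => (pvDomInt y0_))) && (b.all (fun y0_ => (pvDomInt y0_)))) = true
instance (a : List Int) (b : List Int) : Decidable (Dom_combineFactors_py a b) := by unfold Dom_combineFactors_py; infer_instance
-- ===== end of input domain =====

-- B replaces A's per-element list.remove scan of b with a counter of a built once and a
-- single decrementing pass over b (objective: faster, asymptotic O(|a|+|b|) vs O(|a|*|b|)).

-- ===== PORT A =====
-- temp.remove(x) with try/except ValueError: pass  →  keep temp unchanged when remove? is none
def combineFactors_py (a : List Int) (b : List Int) : List Int :=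
  if a ≠ [] ∧ b ≠ [] then
    let temp := a.foldl (fun temp x =>
      match PySem.List.remove? temp x with
      | some t => t
      | none => temp) b
    a ++ temp
  else
    if a ≠ [] then a else b

-- ===== PORT B =====
def combineFactors_py_alt (a : List Int) (b : List Int) : List Int :=
  let counts : PySem.Dict Int Int := a.foldl (fun d x => d.insert x (d.getD x 0 + 1)) PySem.Dict.empty
  let s := b.foldl (fun (s : PySem.Dict Int Int × List Int) y =>
      let c := s.1.getD y 0
      if c ≠ 0 then (s.1.insert y (c - 1), s.2) else (s.1, s.2 ++ [y]))
    (counts, ([] : List Int))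
  a ++ s.2

-- ===== PRECONDITION & SPEC =====
def Spec_combineFactors_py (a : List Int) (b : List Int) (out : List Int) : Prop := out = combineFactors_py_alt a b
instance (a : List Int) (b : List Int) (out : List Int) : Decidable (Spec_combineFactors_py a b out) := by unfold Spec_combineFactors_py; infer_instance

-- ===== CLAIM (what is proved, stated in full; the proofs are below) =====
def Claim_equal_combineFactors_py : Prop := ∀ (a : List Int) (b : List Int), Dom_combineFactors_py a b → Spec_combineFactors_py a b (combineFactors_py a b)

-- ===== LEMMAS AND PROOFS =====

/-- Spec-level single pass: keep `y` if its remaining count is zero, else decrement. -/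
def filterC (f : Int → Nat) : List Int → List Int
  | [] => []
  | y :: t => if f y = 0 then y :: filterC f t else filterC (fun v => if v = y then f y - 1 else f v) t

theorem filterC_zero (temp : List Int) : filterC (fun _ => 0) temp = temp := by
  induction temp with
  | nil => rfl
  | cons y t ih => simp [filterC, ih]

theorem filterC_inc (f : Int → Nat) (x : Int) (temp : List Int) :
    filterC (fun v => if v = x then f v + 1 else f v) temp = filterC f (temp.erase x) := by
  induction temp generalizing f with
  | nil => rfl
  | cons y t ih =>
    by_cases hyx : y = x
    · subst hyx
      rw [List.erase_cons_head, filterC]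
      have hcond : (if y = y then f y + 1 else f y) = f y + 1 := if_pos rfl
      rw [hcond, if_neg (Nat.succ_ne_zero (f y))]
      have hfun : (fun v => if v = y then f y + 1 - 1 else if v = y then f v + 1 else f v) = f := by
        funext v
        by_cases hv : v = y <;> simp [hv]
      rw [hfun]
    · have hxy : ¬ x = y := fun h => hyx h.symm
      have herase : (y :: t).erase x = y :: t.erase x := by
        rw [List.erase_cons_tail]
        simp [hyx]
      rw [herase, filterC, filterC]
      have hcy : (if y = x then f y + 1 else f y) = f y := if_neg hyx
      rw [hcy]
      by_cases hfy : f y = 0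
      · rw [if_pos hfy, if_pos hfy, ih]
      · rw [if_neg hfy, if_neg hfy]
        have hfun : (fun v => if v = y then f y - 1 else if v = x then f v + 1 else f v)
            = (fun v => if v = x then (if v = y then f y - 1 else f v) + 1
              else (if v = y then f y - 1 else f v)) := by
          funext v
          by_cases hv : v = y
          · subst hv; simp [hyx]
          · by_cases hvx : v = x
            · subst hvx; simp [hv]
            · simp [hv, hvx]
        rw [hfun, ih]

theorem astep_eq_erase (temp : List Int) (x : Int) :
    (match PySem.List.remove? temp x with
      | some t => t
      | none => temp) = temp.erase x := by
  by_cases hx : x ∈ temp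
  · rw [PySem.List.remove?_eq_some_erase _ _ hx]
  · rw [(PySem.List.remove?_eq_none_iff temp x).2 hx, List.erase_of_not_mem hx]

theorem foldlA_eq_filterC (a : List Int) (temp : List Int) :
    a.foldl (fun temp x =>
      match PySem.List.remove? temp x with
      | some t => t
      | none => temp) temp = filterC (fun v => a.count v) temp := by
  induction a generalizing temp with
  | nil => simpa using (filterC_zero temp).symm
  | cons x a' ih =>
    rw [List.foldl_cons, astep_eq_erase, ih]
    have hc : (fun v => (x :: a').count v) = fun v => if v = x then a'.count v + 1 else a'.count v := by
      funext v
      by_cases hv : v = x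
      · simp [hv]
      · simp [hv, Ne.symm hv]
    rw [hc, filterC_inc]

/-- B's pass over `b`, with the dict agreeing with `f`, appends `filterC f b` to the accumulator. -/
theorem foldlB_eq_filterC (b : List Int) (d : PySem.Dict Int Int) (acc : List Int)
    (f : Int → Nat) (h : ∀ v, d.getD v 0 = (f v : Int)) :
    (b.foldl (fun (s : PySem.Dict Int Int × List Int) y =>
      let c := s.1.getD y 0
      if c ≠ 0 then (s.1.insert y (c - 1), s.2) else (s.1, s.2 ++ [y])) (d, acc)).2
    = acc ++ filterC f b := by
  induction b generalizing d acc f with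
  | nil => simp [filterC]
  | cons y t ih =>
    rw [List.foldl_cons]
    simp only [h y]
    by_cases hfy : f y = 0
    · rw [if_neg (by simp [hfy])]
      rw [ih _ _ f h]
      simp [filterC, hfy]
    · rw [if_pos (by exact_mod_cast hfy)]
      have h' : ∀ v, (d.insert y ((f y : Int) - 1)).getD v 0
          = ((if v = y then f y - 1 else f v : Nat) : Int) := by
        intro v
        rw [PySem.Dict.getD_insert]
        by_cases hv : v = y
        · rw [if_pos hv, if_pos hv]
          have h1 : 1 ≤ f y := Nat.one_le_iff_ne_zero.2 hfy
          omega
        · rw [if_neg hv, if_neg hv, h v]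
      rw [ih _ _ _ h']
      simp [filterC, hfy]

theorem alt_closed (a b : List Int) :
    combineFactors_py_alt a b = a ++ filterC (fun v => a.count v) b := by
  have h0 : combineFactors_py_alt a b
      = a ++ (b.foldl (fun (s : PySem.Dict Int Int × List Int) y =>
        let c := s.1.getD y 0
        if c ≠ 0 then (s.1.insert y (c - 1), s.2) else (s.1, s.2 ++ [y]))
        (PySem.Dict.counter a, ([] : List Int))).2 := by
    rw [combineFactors_py_alt, ← PySem.Dict.foldl_insert_getD_add_one_eq_counter]
  rw [h0, foldlB_eq_filterC b _ [] (fun v => a.count v) (fun v => PySem.Dict.getD_counter a v)]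
  simp

-- ===== VERDICT (by name: the statement is the Claim_ definition above) =====
theorem combineFactors_py_spec : Claim_equal_combineFactors_py := by
  intro a b _
  show combineFactors_py a b = combineFactors_py_alt a b
  rw [alt_closed]
  unfold combineFactors_py
  by_cases ha : a = []
  · subst ha
    simp [filterC_zero]
  · by_cases hb : b = []
    · subst hb
      simp [ha, filterC]
    · rw [if_pos ⟨ha, hb⟩]
      simp only [foldlA_eq_filterC]
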